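-- pv_equiv track=rewrite | github.com/kicco73/codility | Extras/test1.py | solution
-- ===== SOURCE A (Python) =====
-- def solution(message, K):
-- 	if K >= len(message):
-- 		return message
--
-- 	k = min(len(message), K)
-- 	k = max(k, 0)
--
-- 	if message[k] == ' ':
-- 		return message[:k]
--
-- 	while k and message[k] != ' ':
-- 		k -= 1
--
-- 	return message[:k]
-- ===== SOURCE B (Python) =====
-- def solution(message, K):
--     if K >= len(message):
--         return message
--     k = max(min(len(message), K), 0)
--     head = message[:k + 1]
--     return ' '.join(head.split(' ')[:-1])
-- ===== Notes on version B (the rewrite author's own statement) =====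
-- stated objective: alternative
-- what changed: A scans backwards character by character from index k to find the last space; B instead slices the head message[:k+1], splits it on ' ', drops the last token and rejoins with ' ', reconstructing the prefix before the last space by tokenize-and-rejoin.
-- outside the precondition, e.g. on solution('', -1): A raises IndexError, B returns ''
import Mathlib
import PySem

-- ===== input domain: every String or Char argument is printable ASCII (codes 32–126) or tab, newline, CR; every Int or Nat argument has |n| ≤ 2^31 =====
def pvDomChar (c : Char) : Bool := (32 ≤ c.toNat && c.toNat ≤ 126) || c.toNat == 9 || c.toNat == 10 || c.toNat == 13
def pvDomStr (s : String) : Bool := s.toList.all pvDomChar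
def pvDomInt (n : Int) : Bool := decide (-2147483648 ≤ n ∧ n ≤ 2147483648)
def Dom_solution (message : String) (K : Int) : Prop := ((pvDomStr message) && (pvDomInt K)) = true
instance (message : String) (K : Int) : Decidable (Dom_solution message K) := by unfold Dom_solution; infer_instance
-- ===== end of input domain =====

-- B replaces A's backward character scan with a tokenize-and-rejoin decomposition
-- (split the clamped head on ' ', drop the last token, rejoin); objective: alternative.


-- ===== PORT A =====
-- the `while k and message[k] != ' ': k -= 1` loop; k stays in [0, len) throughout,
-- so `message[k]` is exactly `cs.getD k ' '` there (the default is never used).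
def awhileA (cs : List Char) : Nat → Nat
  | 0 => 0
  | (k + 1) => if cs.getD (k + 1) ' ' ≠ ' ' then awhileA cs k else k + 1

def solution (message : String) (K : Int) : String :=
  if K ≥ PySem.Str.len message then message
  else
    let cs := message.toList
    let k : Int := min (PySem.Str.len message) K
    let k : Int := max k 0
    match PySem.Str.pyGet? message k with
    | none => ""  -- Python raises IndexError here (message = "", K < 0); excluded by Pre_solution
    | some c =>
      if c = ' ' then String.ofList (PySem.List.slice cs none (some k))
      else String.ofList (PySem.List.slice cs none (some ((awhileA cs k.toNat : Nat) : Int)))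

-- ===== PORT B =====
-- head.split(' ') is ported as List.splitOn ' ' (exact for a one-character separator);
-- ' '.join is PySem.Chars.join; [:-1] is PySem.List.slice … (-1).
def solution_alt (message : String) (K : Int) : String :=
  if K ≥ PySem.Str.len message then message
  else
    let cs := message.toList
    let k : Int := max (min (PySem.Str.len message) K) 0
    let head := PySem.List.slice cs none (some (k + 1))
    String.ofList (PySem.Chars.join [' '] (PySem.List.slice (head.splitOn ' ') none (some (-1))))

-- ===== PRECONDITION & SPEC =====
-- Pre_ excludes only (message = "", K < 0), where A's `message[k]` raises IndexError.
def Pre_solution (message : String) (K : Int) : Prop := message ≠ "" ∨ 0 ≤ K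
instance (message : String) (K : Int) : Decidable (Pre_solution message K) := by unfold Pre_solution; infer_instance
def pvWitness_solution : String × Int := ("hello world today", 13)

def Spec_solution (message : String) (K : Int) (out : String) : Prop := out = solution_alt message K
instance (message : String) (K : Int) (out : String) : Decidable (Spec_solution message K out) := by unfold Spec_solution; infer_instance

-- ===== CLAIM (what is proved, stated in full; the proofs are below) =====
def Claim_equal_solution : Prop := ∀ (message : String) (K : Int), Dom_solution message K → Pre_solution message K → Spec_solution message K (solution message K)

-- ===== LEMMAS AND PROOFS =====

-- the prefix of h strictly before its LAST space (or [] if h has no space):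
-- the common characterisation both ports are reduced to.
def lsp : List Char → List Char
  | [] => []
  | c :: t => if ' ' ∈ t then c :: lsp t else []

theorem lsp_append (h : List Char) (c : Char) :
    lsp (h ++ [c]) = if c = ' ' then h else lsp h := by
  induction h with
  | nil => by_cases hc : c = ' ' <;> simp [lsp, hc]
  | cons a t ih =>
    by_cases hc : c = ' '
    · subst hc; simp [lsp, ih]
    · by_cases ht : ' ' ∈ t <;> simp [lsp, ih, hc, ht, Ne.symm hc]

theorem splitOn_cons_space (t : List Char) :
    (' ' :: t).splitOn ' ' = [] :: t.splitOn ' ' := by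
  simp [List.splitOn, List.splitOnP_cons]

theorem splitOn_cons_ne (a : Char) (t : List Char) (ha : a ≠ ' ') :
    (a :: t).splitOn ' ' = (t.splitOn ' ').modifyHead (a :: ·) := by
  simp [List.splitOn, List.splitOnP_cons, ha]

theorem splitOn_of_not_mem (t : List Char) (h : ' ' ∉ t) : t.splitOn ' ' = [t] := by
  induction t with
  | nil => simp [List.splitOn, List.splitOnP_nil]
  | cons a t ih =>
    have ha : a ≠ ' ' := fun hh => h (by simp [hh])
    have ht : ' ' ∉ t := fun hh => h (by simp [hh])
    rw [splitOn_cons_ne a t ha, ih ht]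
    rfl

theorem splitOn_of_mem (t : List Char) (h : ' ' ∈ t) :
    ∃ p b bs, t.splitOn ' ' = p :: b :: bs := by
  induction t with
  | nil => simp at h
  | cons a t ih =>
    by_cases ha : a = ' '
    · subst ha
      cases hq : t.splitOn ' ' with
      | nil =>
        have := List.splitOnP_ne_nil (fun x => x == ' ') t
        rw [List.splitOn] at hq
        exact absurd hq this
      | cons q qs => exact ⟨[], q, qs, by rw [splitOn_cons_space, hq]⟩
    · have ht : ' ' ∈ t := by
        rcases List.mem_cons.mp h with h1 | h1
        · exact absurd h1.symm ha
        · exact h1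
      obtain ⟨p, b, bs, hp⟩ := ih ht
      exact ⟨a :: p, b, bs, by rw [splitOn_cons_ne a t ha, hp]; rfl⟩

theorem join_cons_head (Q : List (List Char)) (c : Char) (p : List Char) :
    PySem.Chars.join [' '] ((c :: p) :: Q) = c :: PySem.Chars.join [' '] (p :: Q) := by
  cases Q with
  | nil => rw [PySem.Chars.join_singleton, PySem.Chars.join_singleton]
  | cons q qs => rw [PySem.Chars.join_cons_cons, PySem.Chars.join_cons_cons]; simp

theorem join_dropLast_splitOn (h : List Char) :
    PySem.Chars.join [' '] ((h.splitOn ' ').dropLast) = lsp h := by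
  induction h with
  | nil => simp [List.splitOn, List.splitOnP_nil, lsp, PySem.Chars.join_nil]
  | cons c t ih =>
    by_cases hc : c = ' '
    · subst hc
      rw [splitOn_cons_space]
      by_cases ht : ' ' ∈ t
      · obtain ⟨p, b, bs, hp⟩ := splitOn_of_mem t ht
        rw [hp] at ih ⊢
        rw [List.dropLast_cons₂] at ih
        rw [List.dropLast_cons₂, List.dropLast_cons₂, PySem.Chars.join_cons_cons]
        simp [lsp, ht, ih]
      · rw [splitOn_of_not_mem t ht]
        simp [lsp, ht, PySem.Chars.join_singleton]
    · rw [splitOn_cons_ne c t hc]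
      by_cases ht : ' ' ∈ t
      · obtain ⟨p, b, bs, hp⟩ := splitOn_of_mem t ht
        rw [hp] at ih ⊢
        rw [List.dropLast_cons₂] at ih
        rw [List.modifyHead_cons, List.dropLast_cons₂, join_cons_head]
        simp [lsp, ht, ih]
      · rw [splitOn_of_not_mem t ht]
        simp [lsp, ht, PySem.Chars.join_nil]

theorem awhileA_succ (cs : List Char) (k : Nat) :
    awhileA cs (k + 1) = if cs.getD (k + 1) ' ' ≠ ' ' then awhileA cs k else k + 1 := rfl

theorem awhileA_spec (cs : List Char) (k : Nat) (hk : k < cs.length) :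
    cs.take (awhileA cs k) =
      (if cs.getD k ' ' = ' ' then cs.take k else lsp (cs.take (k + 1))) := by
  induction k with
  | zero =>
    have h1 : cs.take 1 = [cs.getD 0 ' '] := by
      cases cs with
      | nil => simp at hk
      | cons a t => simp [List.getD]
    by_cases h0 : cs.getD 0 ' ' = ' ' <;> simp [awhileA, h1, lsp]
  | succ k ih =>
    have hk' : k < cs.length := by omega
    have htake : cs.take (k + 1 + 1) = cs.take (k + 1) ++ [cs.getD (k + 1) ' '] := by
      rw [List.take_add_one]
      simp [List.getElem?_eq_getElem hk]
    have htake' : cs.take (k + 1) = cs.take k ++ [cs.getD k ' '] := by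
      rw [List.take_add_one]
      simp [List.getElem?_eq_getElem hk']
    rw [awhileA_succ]
    by_cases h1 : cs.getD (k + 1) ' ' = ' '
    · rw [if_neg (by simpa using h1), if_pos h1]
    · rw [if_pos h1, if_neg h1, ih hk', htake, lsp_append, if_neg h1]
      by_cases h0 : cs.getD k ' ' = ' '
      · rw [if_pos h0, htake', lsp_append, if_pos h0]
      · rw [if_neg h0]

-- ===== VERDICT (by name: the statement is the Claim_ definition above) =====
theorem solution_spec : Claim_equal_solution := by
  intro message K _hdom hpre
  unfold Spec_solution solution solution_alt
  by_cases hK : K ≥ PySem.Str.len message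
  · rw [if_pos hK, if_pos hK]
  · rw [if_neg hK, if_neg hK]
    dsimp only
    set cs := message.toList with hcs
    have hlen : PySem.Str.len message = (cs.length : Int) := PySem.Str.len_eq message
    have hne : cs ≠ [] := by
      intro h0
      rcases hpre with h | h
      · exact h (String.toList_eq_nil_iff.mp h0)
      · exact hK (by rw [hlen, h0]; simpa using h)
    have hpos : 0 < cs.length := List.length_pos_iff.mpr hne
    have hKlt : K < (cs.length : Int) := by rw [hlen] at hK; omega
    set k : Int := max (min (PySem.Str.len message) K) 0 with hkdef
    have hk0 : 0 ≤ k := le_max_right _ _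
    have hklt : k < (cs.length : Int) := by
      rw [hkdef, hlen]
      omega
    set kn : Nat := k.toNat with hkn
    have hknlt : kn < cs.length := by omega
    have hget : PySem.Str.pyGet? message k = some cs[kn] := by
      unfold PySem.Str.pyGet? PySem.Chars.pyGet?
      rw [← hcs, PySem.List.pyGet?_of_nonneg cs hk0, ← hkn, List.getElem?_eq_getElem hknlt]
    rw [hget]
    dsimp only
    have hk1 : (k + 1).toNat = kn + 1 := by omega
    have hslice1 : PySem.List.slice cs none (some k) = cs.take kn := PySem.List.slice_to cs hk0
    have hslice2 : PySem.List.slice cs none (some (k + 1)) = cs.take (kn + 1) := by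
      rw [PySem.List.slice_to cs (by omega), hk1]
    rw [hslice1, hslice2, PySem.List.slice_to_neg_one, join_dropLast_splitOn,
      PySem.List.slice_to_natCast]
    have hgd : cs.getD kn ' ' = cs[kn] := List.getD_eq_getElem _ _ hknlt
    have htake' : cs.take (kn + 1) = cs.take kn ++ [cs[kn]] := by
      rw [List.take_add_one]; simp [List.getElem?_eq_getElem hknlt]
    by_cases hc : cs[kn] = ' '
    · rw [if_pos hc, htake', lsp_append, if_pos hc]
    · rw [if_neg hc, awhileA_spec cs kn hknlt, hgd, if_neg hc]
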